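-- pv_equiv track=rewrite | github.com/AsukaIIV/srt-summarizer | srt_summarizer/processing/output_writer.py | normalize_markdown_content
-- ===== SOURCE A (Python) =====
-- def normalize_markdown_content(content: str) -> str:
--     lines = [line.rstrip() for line in content.replace("\r\n", "\n").split("\n")]
--     cleaned: list[str] = []
--     blank_run = 0
--     for line in lines:
--         if not line.strip():
--             blank_run += 1
--             if blank_run > 1:
--                 continue
--             cleaned.append("")
--             continue
--         blank_run = 0
--         cleaned.append(line)
--     text = "\n".join(cleaned).strip()
--     return text + "\n" if text else ""
-- ===== SOURCE B (Python) =====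
-- def normalize_markdown_content(content: str) -> str:
--     lines = [line.rstrip() for line in content.replace("\r\n", "\n").split("\n")]
--     # keep a line when it is non-blank, or when the line before it was non-blank
--     # (the first line has no predecessor, so it is always kept)
--     kept = [cur for prev, cur in zip(["."] + lines, lines) if cur or prev]
--     text = "\n".join(kept).strip()
--     return text + "\n" if text else ""
-- ===== Notes on version B (the rewrite author's own statement) =====
-- stated objective: idiomatic
-- what changed: Replaces A's stateful blank_run counter loop with a declarative pairwise filter: zip each line with its predecessor and keep it when it or its predecessor is non-blank.
import Mathlib
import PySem

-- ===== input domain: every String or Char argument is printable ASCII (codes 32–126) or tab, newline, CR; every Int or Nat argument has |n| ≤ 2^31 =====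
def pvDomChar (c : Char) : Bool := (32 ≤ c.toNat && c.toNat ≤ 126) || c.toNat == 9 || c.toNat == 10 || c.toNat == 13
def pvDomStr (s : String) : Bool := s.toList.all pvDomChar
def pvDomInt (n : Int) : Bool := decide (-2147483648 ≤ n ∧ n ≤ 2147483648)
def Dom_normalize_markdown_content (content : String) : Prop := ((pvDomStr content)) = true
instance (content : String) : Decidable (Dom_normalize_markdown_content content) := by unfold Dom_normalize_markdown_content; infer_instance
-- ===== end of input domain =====

-- B replaces A's blank_run state machine with a pairwise zip-and-filter over each line and its predecessor (idiomatic decomposition; same O(n) cost).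


-- ===== PORT A =====
def normalize_markdown_content (content : String) : String :=
  let lines := (PySem.Chars.splitOn (PySem.Chars.replace content.toList ['\r', '\n'] ['\n']) ['\n']).map PySem.Chars.rstrip
  let res := lines.foldl (fun (st : List (List Char) × Int) line =>
      if PySem.Chars.strip line = [] then
        if st.2 + 1 > 1 then (st.1, st.2 + 1) else (st.1 ++ [[]], st.2 + 1)
      else (st.1 ++ [line], 0)) ([], 0)
  let text := PySem.Chars.strip (PySem.Chars.join ['\n'] res.1)
  if text = [] then "" else String.ofList (text ++ ['\n'])

-- ===== PORT B =====
def normalize_markdown_content_alt (content : String) : String :=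
  let lines := (PySem.Chars.splitOn (PySem.Chars.replace content.toList ['\r', '\n'] ['\n']) ['\n']).map PySem.Chars.rstrip
  let kept := ((List.zip (['.'] :: lines) lines).filter (fun pc => !pc.2.isEmpty || !pc.1.isEmpty)).map Prod.snd
  let text := PySem.Chars.strip (PySem.Chars.join ['\n'] kept)
  if text = [] then "" else String.ofList (text ++ ['\n'])

-- ===== PRECONDITION & SPEC =====
def Spec_normalize_markdown_content (content : String) (out : String) : Prop := out = normalize_markdown_content_alt content
instance (content : String) (out : String) : Decidable (Spec_normalize_markdown_content content out) := by unfold Spec_normalize_markdown_content; infer_instance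

-- ===== CLAIM (what is proved, stated in full; the proofs are below) =====
def Claim_equal_normalize_markdown_content : Prop := ∀ (content : String), Dom_normalize_markdown_content content → Spec_normalize_markdown_content content (normalize_markdown_content content)

-- ===== LEMMAS AND PROOFS =====

lemma rstrip_eq_nil_iff (cs : List Char) :
    PySem.Chars.rstrip cs = [] ↔ ∀ c ∈ cs, PySem.Chars.isspace c = true := by
  simp [PySem.Chars.rstrip, List.dropWhile_eq_nil_iff]

-- on an rstripped line, 'not line.strip()' is the same test as 'line == ""'
lemma strip_rstrip_eq_nil_iff (cs : List Char) :
    PySem.Chars.strip (PySem.Chars.rstrip cs) = [] ↔ PySem.Chars.rstrip cs = [] := by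
  constructor
  · intro h
    have hall : ∀ c ∈ PySem.Chars.lstrip (PySem.Chars.rstrip cs), PySem.Chars.isspace c = true :=
      (rstrip_eq_nil_iff _).mp (by simpa [PySem.Chars.strip] using h)
    cases hd : List.dropWhile PySem.Chars.isspace cs.reverse with
    | nil => simp [PySem.Chars.rstrip, hd]
    | cons x xs =>
      exfalso
      have hne : List.dropWhile PySem.Chars.isspace cs.reverse ≠ [] := by simp [hd]
      have hx : ¬ PySem.Chars.isspace x = true := by
        simpa [hd] using List.head_dropWhile_not PySem.Chars.isspace hne
      have hx2 : x ∈ PySem.Chars.rstrip cs := by simp [PySem.Chars.rstrip, hd]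
      have hsplit := List.takeWhile_append_dropWhile (p := PySem.Chars.isspace) (l := PySem.Chars.rstrip cs)
      rw [← hsplit] at hx2
      rcases List.mem_append.mp hx2 with h1 | h2
      · exact hx (List.mem_takeWhile_imp h1)
      · exact hx (hall x h2)
  · intro h; simp [PySem.Chars.strip, h, PySem.Chars.lstrip]; decide

-- A's blank_run loop produces exactly B's predecessor filter, under the invariant br = 0 ↔ prev ≠ []
lemma loop_eq_filter : ∀ (ls : List (List Char)),
    (∀ l ∈ ls, (PySem.Chars.strip l = [] ↔ l = [])) →
    ∀ (acc : List (List Char)) (br : Int) (prev : List Char), 0 ≤ br → (br = 0 ↔ prev ≠ []) →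
    (ls.foldl (fun (st : List (List Char) × Int) line =>
      if PySem.Chars.strip line = [] then
        if st.2 + 1 > 1 then (st.1, st.2 + 1) else (st.1 ++ [[]], st.2 + 1)
      else (st.1 ++ [line], 0)) (acc, br)).1
    = acc ++ ((List.zip (prev :: ls) ls).filter (fun pc => !pc.2.isEmpty || !pc.1.isEmpty)).map Prod.snd := by
  intro ls
  induction ls with
  | nil => intro _ acc br prev _ _; simp
  | cons l ls ih =>
    intro h acc br prev hbr hinv
    have hl := h l (by simp)
    have hls : ∀ x ∈ ls, (PySem.Chars.strip x = [] ↔ x = []) := fun x hx => h x (by simp [hx])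
    simp only [List.foldl_cons]
    by_cases hb : PySem.Chars.strip l = []
    · have hle : l = [] := hl.mp hb
      rw [if_pos hb]
      by_cases h0 : br = 0
      · have hprev : prev ≠ [] := hinv.mp h0
        have hinv' : br + 1 = 0 ↔ l ≠ [] := by subst hle; simp; omega
        rw [if_neg (show ¬ (br + 1 > 1) by omega)]
        rw [ih hls (acc ++ [[]]) (br + 1) l (by omega) hinv']
        subst hle
        simp [List.zip_cons_cons, hprev]
      · have hprev : prev = [] := by
          rcases eq_or_ne prev [] with h' | h'
          · exact h'
          · exact absurd (hinv.mpr h') h0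
        have hinv' : br + 1 = 0 ↔ l ≠ [] := by subst hle; simp; omega
        rw [if_pos (show br + 1 > 1 by omega)]
        rw [ih hls acc (br + 1) l (by omega) hinv']
        subst hle hprev
        simp [List.zip_cons_cons]
    · have hne : l ≠ [] := fun he => hb (hl.mpr he)
      rw [if_neg hb]
      rw [ih hls (acc ++ [l]) 0 l (by omega) (by simp [hne])]
      simp [List.zip_cons_cons, hne]

-- ===== VERDICT (by name: the statement is the Claim_ definition above) =====
theorem normalize_markdown_content_spec : Claim_equal_normalize_markdown_content := by
  intro content _
  unfold Spec_normalize_markdown_content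
  simp only [normalize_markdown_content, normalize_markdown_content_alt]
  rw [loop_eq_filter _ (by
      intro l hl
      rcases List.mem_map.mp hl with ⟨x, _, rfl⟩
      exact strip_rstrip_eq_nil_iff x) [] 0 ['.'] (by omega) (by simp)]
  simp
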